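-- pv_equiv track=rewrite | github.com/ivanromero2708/Valida | tests/final.py | _n_activos_con_datos_precint
-- ===== SOURCE A (Python) =====
-- from typing import Any, Dict, List, Optional, Tuple
--
-- TEMPLATE_ACTIVOS_MAX_PI = 5  # pares AN1/AN2
--
-- def _n_activos_con_datos_precint(
--     filas_input: List[Dict[str, Any]], max_activos: int = TEMPLATE_ACTIVOS_MAX_PI
-- ) -> int:
--     n = 0
--     for i in range(max_activos):
--         hay = False
--         for f in filas_input:
--             acts = f.get("activos", [])
--             if i < len(acts) and acts[i]:
--                 a = acts[i]
--                 if a.get("an1") is not None or a.get("an2") is not None: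
--                     hay = True
--                     break
--         if hay:
--             n = i + 1
--         else:
--             break
--     return n
-- ===== SOURCE B (Python) =====
-- from typing import Any, Dict, List, Optional, Tuple
--
-- TEMPLATE_ACTIVOS_MAX_PI = 5  # pares AN1/AN2
--
-- def _n_activos_con_datos_precint(
--     filas_input: List[Dict[str, Any]], max_activos: int = TEMPLATE_ACTIVOS_MAX_PI
-- ) -> int:
--     # Single row-major sweep building a presence table, then a prefix scan.
--     # Columns beyond the widest row can never have data, so the table is
--     # capped at min(max_activos, widest row).
--     cols = min(max_activos,
--                max((len(f.get("activos", [])) for f in filas_input), default=0))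
--     present = [False] * cols
--     for f in filas_input:
--         for i, a in enumerate(f.get("activos", [])):
--             if i >= len(present):
--                 break
--             if a and (a.get("an1") is not None or a.get("an2") is not None):
--                 present[i] = True
--     n = 0
--     for p in present:
--         if not p:
--             break
--         n += 1
--     return n
-- ===== Notes on version B (the rewrite author's own statement) =====
-- stated objective: alternative
-- what changed: Replaced A's column-outer loop (which rescans all rows for each column index with an early break) by a single row-major sweep that fills a boolean presence table over the columns, followed by a short prefix scan of that table.
import Mathlib
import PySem

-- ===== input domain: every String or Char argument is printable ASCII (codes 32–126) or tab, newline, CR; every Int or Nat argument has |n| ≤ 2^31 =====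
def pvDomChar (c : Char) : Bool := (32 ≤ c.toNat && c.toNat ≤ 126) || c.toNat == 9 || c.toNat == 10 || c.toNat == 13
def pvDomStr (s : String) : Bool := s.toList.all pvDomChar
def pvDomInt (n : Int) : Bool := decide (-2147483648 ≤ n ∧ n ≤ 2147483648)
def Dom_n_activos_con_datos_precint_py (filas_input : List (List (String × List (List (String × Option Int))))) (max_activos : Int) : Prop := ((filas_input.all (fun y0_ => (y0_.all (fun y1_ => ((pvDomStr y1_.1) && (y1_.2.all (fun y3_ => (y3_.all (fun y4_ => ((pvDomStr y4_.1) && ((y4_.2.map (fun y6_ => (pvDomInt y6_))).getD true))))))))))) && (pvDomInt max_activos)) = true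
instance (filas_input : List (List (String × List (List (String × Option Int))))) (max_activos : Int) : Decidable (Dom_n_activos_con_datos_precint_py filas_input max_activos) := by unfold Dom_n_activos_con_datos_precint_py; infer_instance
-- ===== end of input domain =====

-- ===== PORT A =====
-- B is an alternative: one row-major sweep building a presence table, instead of A's column-outer rescans.
-- shared guard: `a and (a.get("an1") is not None or a.get("an2") is not None)` (a dict is truthy iff nonempty;
-- .get is not None iff the key maps to a non-None value)
def pvNotNone (o : Option (Option Int)) : Bool :=
  match o with
  | some (some _) => true
  | _ => false

def pvCond (a : List (String × Option Int)) : Bool :=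
  !a.isEmpty && (pvNotNone ((a.lookup "an1")) || pvNotNone ((a.lookup "an2")))

-- inner `for f in filas_input: ... break` of A, for a fixed column i
def pvHayA (filas : List (List (String × List (List (String × Option Int))))) (i : Nat) : Bool :=
  match filas with
  | [] => false
  | f :: rest =>
      let acts := ((f.lookup "activos").getD [])
      match acts[i]? with
      | some a => if pvCond a then true else pvHayA rest i
      | none => pvHayA rest i

-- outer `for i in range(max_activos)` with break; n carried as in A
def pvLoopA (filas : List (List (String × List (List (String × Option Int))))) :
    Nat → Nat → Int → Int
  | 0, _, n => n
  | fuel + 1, i, n =>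
      if pvHayA filas i then pvLoopA filas fuel (i + 1) (Int.ofNat (i + 1)) else n

def n_activos_con_datos_precint_py (filas_input : List (List (String × List (List (String × Option Int))))) (max_activos : Int) : Int :=
  pvLoopA filas_input max_activos.toNat 0 0

-- ===== PORT B =====
-- `for i, a in enumerate(f.get("activos", [])): if i >= len(present): break; ... present[i] = True`
def pvMarkRow (present : List Bool) (i : Nat) (acts : List (List (String × Option Int))) : List Bool :=
  match acts with
  | [] => present
  | a :: rest =>
      if present.length ≤ i then present
      else
        let present' := if pvCond a then present.set i true else present
        pvMarkRow present' (i + 1) rest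

-- final `for p in present: if not p: break; n += 1`
def pvPrefix : List Bool → Int
  | [] => 0
  | b :: rest => if b then pvPrefix rest + 1 else 0

-- `max((len(f.get("activos", [])) for f in filas_input), default=0)`
def pvMaxLen (filas : List (List (String × List (List (String × Option Int))))) : Nat :=
  filas.foldl (fun m f => max m ((f.lookup "activos").getD []).length) 0

def n_activos_con_datos_precint_py_alt (filas_input : List (List (String × List (List (String × Option Int))))) (max_activos : Int) : Int :=
  let cols := min max_activos.toNat (pvMaxLen filas_input)
  let present := filas_input.foldl
    (fun p f => pvMarkRow p 0 (((f.lookup "activos").getD []))) (List.replicate cols false)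
  pvPrefix present

-- ===== PRECONDITION & SPEC =====
def Spec_n_activos_con_datos_precint_py (filas_input : List (List (String × List (List (String × Option Int))))) (max_activos : Int) (out : Int) : Prop := out = n_activos_con_datos_precint_py_alt filas_input max_activos
instance (filas_input : List (List (String × List (List (String × Option Int))))) (max_activos : Int) (out : Int) : Decidable (Spec_n_activos_con_datos_precint_py filas_input max_activos out) := by unfold Spec_n_activos_con_datos_precint_py; infer_instance

-- ===== CLAIM (what is proved, stated in full; the proofs are below) =====
def Claim_equal_n_activos_con_datos_precint_py : Prop := ∀ (filas_input : List (List (String × List (List (String × Option Int))))) (max_activos : Int), Dom_n_activos_con_datos_precint_py filas_input max_activos → Spec_n_activos_con_datos_precint_py filas_input max_activos (n_activos_con_datos_precint_py filas_input max_activos)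

-- ===== LEMMAS AND PROOFS =====

-- per-row column check
def pvCheckF (f : List (String × List (List (String × Option Int)))) (i : Nat) : Bool :=
  match (((f.lookup "activos").getD []))[i]? with
  | some a => pvCond a
  | none => false

theorem pvHayA_eq (filas : List (List (String × List (List (String × Option Int))))) (i : Nat) :
    pvHayA filas i = filas.any (fun f => pvCheckF f i) := by
  induction filas with
  | nil => simp [pvHayA]
  | cons f rest ih =>
      simp only [List.any_cons, ← ih, pvHayA]
      cases h : (((f.lookup "activos").getD []))[i]? with
      | none => simp [pvCheckF, h]
      | some a => by_cases hc : pvCond a <;> simp [pvCheckF, h, hc]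

theorem pvMarkRow_length (acts : List (List (String × Option Int))) :
    ∀ (p : List Bool) (i : Nat), (pvMarkRow p i acts).length = p.length := by
  induction acts with
  | nil => intro p i; rfl
  | cons a rest ih =>
      intro p i
      simp only [pvMarkRow]
      split
      · rfl
      · rw [ih]; split <;> simp

theorem pvMarkRow_getD (acts : List (List (String × Option Int))) :
    ∀ (p : List Bool) (i j : Nat),
      (pvMarkRow p i acts).getD j false =
        (p.getD j false ||
          (decide (i ≤ j) && decide (j < p.length) &&
            (match acts[j - i]? with | some a => pvCond a | none => false))) := by
  induction acts with
  | nil => intro p i j; simp [pvMarkRow]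
  | cons a rest ih =>
      intro p i j
      simp only [pvMarkRow]
      split
      · rename_i hle
        have : ¬ (i ≤ j ∧ j < p.length) := by omega
        by_cases h1 : i ≤ j <;> by_cases h2 : j < p.length <;> simp_all
      · rename_i hlt
        push_neg at hlt
        rw [ih]
        have hlen : (if pvCond a then p.set i true else p).length = p.length := by
          split <;> simp
        rw [hlen]
        by_cases hij : j = i
        · subst hij
          have h1 : j - j = 0 := by omega
          have hset : (p.set j true).getD j false = true := by
            simp [List.getD, List.getElem?_set_self (by omega : j < p.length)]
          have : ¬ (j + 1 ≤ j) := by omega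
          by_cases hc : pvCond a <;>
            simp_all [List.getD]
        · have hg : (if pvCond a then p.set i true else p).getD j false = p.getD j false := by
            split
            · simp [List.getD, List.getElem?_set_ne (fun h => hij h.symm)]
            · rfl
          rw [hg]
          by_cases h1 : i ≤ j
          · have h2 : i + 1 ≤ j := by omega
            have h3 : j - i = (j - (i + 1)) + 1 := by omega
            simp [h1, h2, h3]
          · have h2 : ¬ (i + 1 ≤ j) := by omega
            simp [h1, h2]

theorem pvHayA_cons (f : List (String × List (List (String × Option Int))))
    (rest : List (List (String × List (List (String × Option Int))))) (i : Nat) :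
    pvHayA (f :: rest) i = (pvCheckF f i || pvHayA rest i) := by
  rw [pvHayA_eq, List.any_cons, ← pvHayA_eq]

def pvStep (p : List Bool) (f : List (String × List (List (String × Option Int)))) : List Bool :=
  pvMarkRow p 0 (((f.lookup "activos").getD []))

theorem pvFold_length (filas : List (List (String × List (List (String × Option Int))))) :
    ∀ (p : List Bool), (filas.foldl pvStep p).length = p.length := by
  induction filas with
  | nil => intro p; rfl
  | cons f rest ih => intro p; simp [List.foldl_cons, ih, pvStep, pvMarkRow_length]

theorem pvFold_getD (filas : List (List (String × List (List (String × Option Int))))) :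
    ∀ (p : List Bool) (j : Nat),
      (filas.foldl pvStep p).getD j false =
        (p.getD j false || (decide (j < p.length) && pvHayA filas j)) := by
  induction filas with
  | nil => intro p j; simp [pvHayA]
  | cons f rest ih =>
      intro p j
      simp only [List.foldl_cons]
      rw [ih]
      unfold pvStep
      rw [pvMarkRow_getD, pvMarkRow_length, pvHayA_cons]
      by_cases h2 : j < p.length <;>
        simp [pvCheckF, h2, Bool.or_assoc, Bool.and_or_distrib_left]

-- A's loop counts the same prefix
def pvCnt (filas : List (List (String × List (List (String × Option Int))))) :
    Nat → Nat → Nat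
  | 0, _ => 0
  | fuel + 1, i => if pvHayA filas i then pvCnt filas fuel (i + 1) + 1 else 0

theorem pvLoopA_eq (filas : List (List (String × List (List (String × Option Int))))) :
    ∀ (fuel i : Nat), pvLoopA filas fuel i (Int.ofNat i) = Int.ofNat (i + pvCnt filas fuel i) := by
  intro fuel
  induction fuel with
  | zero => intro i; simp [pvLoopA, pvCnt]
  | succ n ih =>
      intro i
      simp only [pvLoopA, pvCnt]
      by_cases h : pvHayA filas i
      · rw [if_pos h, if_pos h, ih (i + 1)]
        congr 1
        omega
      · rw [if_neg h, if_neg h]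
        simp

theorem pvPrefix_eq (filas : List (List (String × List (List (String × Option Int))))) :
    ∀ (p : List Bool) (k : Nat),
      (∀ j, j < p.length → p.getD j false = pvHayA filas (k + j)) →
      pvPrefix p = Int.ofNat (pvCnt filas p.length k) := by
  intro p
  induction p with
  | nil => intro k _; simp [pvPrefix, pvCnt]
  | cons b rest ih =>
      intro k h
      have hb : b = pvHayA filas k := by
        have := h 0 (by simp)
        simpa [List.getD] using this
      simp only [pvPrefix, List.length_cons, pvCnt, ← hb]
      cases b with
      | false => simp
      | true =>
          simp only [if_true]
          have := ih (k + 1) (fun j hj => by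
            have := h (j + 1) (by simpa using Nat.succ_lt_succ hj)
            simpa [List.getD, Nat.add_assoc, Nat.add_comm 1 j, Nat.add_left_comm] using this)
          rw [this]
          simp only [Int.ofNat_eq_natCast]
          omega

theorem pvMaxLen_fold_le (filas : List (List (String × List (List (String × Option Int))))) :
    ∀ (m : Nat), m ≤ filas.foldl (fun m f => max m ((f.lookup "activos").getD []).length) m := by
  induction filas with
  | nil => intro m; simp
  | cons f rest ih =>
      intro m
      simp only [List.foldl_cons]
      exact le_trans (le_max_left _ _) (ih _)

theorem pvMaxLen_fold_mono (filas : List (List (String × List (List (String × Option Int))))) :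
    ∀ (m m' : Nat), m ≤ m' →
      filas.foldl (fun m f => max m ((f.lookup "activos").getD []).length) m ≤
      filas.foldl (fun m f => max m ((f.lookup "activos").getD []).length) m' := by
  induction filas with
  | nil => intro m m' h; simpa
  | cons f rest ih =>
      intro m m' h
      simp only [List.foldl_cons]
      exact ih _ _ (max_le_max_right _ h)

theorem pvMaxLen_le (filas : List (List (String × List (List (String × Option Int))))) (f : List (String × List (List (String × Option Int)))) (hf : f ∈ filas) :
    ((f.lookup "activos").getD []).length ≤ pvMaxLen filas := by
  induction filas with
  | nil => cases hf
  | cons g rest ih =>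
      unfold pvMaxLen
      simp only [List.foldl_cons]
      rcases List.mem_cons.mp hf with h | h
      · subst h
        exact le_trans (le_trans (le_max_right _ _) (pvMaxLen_fold_le rest _))
          (le_of_eq rfl)
      · exact le_trans (ih h) (pvMaxLen_fold_mono rest _ _ (Nat.zero_le _))

theorem pvHayA_false_of_ge (filas : List (List (String × List (List (String × Option Int))))) (i : Nat) (hi : pvMaxLen filas ≤ i) :
    pvHayA filas i = false := by
  rw [pvHayA_eq]
  rw [List.any_eq_false]
  intro f hf
  unfold pvCheckF
  have : ((f.lookup "activos").getD []).length ≤ i := le_trans (pvMaxLen_le filas f hf) hi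
  rw [List.getElem?_eq_none this]
  simp

theorem pvCnt_trunc (filas : List (List (String × List (List (String × Option Int))))) :
    ∀ (f2 f1 i : Nat), f2 ≤ f1 → (∀ j, i + f2 ≤ j → pvHayA filas j = false) →
      pvCnt filas f1 i = pvCnt filas f2 i := by
  intro f2
  induction f2 with
  | zero =>
      intro f1 i _ hg
      have h0 : pvHayA filas i = false := hg i (by omega)
      cases f1 with
      | zero => rfl
      | succ n => simp [pvCnt, h0]
  | succ n ih =>
      intro f1 i hle hg
      cases f1 with
      | zero => omega
      | succ m =>
          simp only [pvCnt]
          by_cases h : pvHayA filas i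
          · rw [if_pos h, if_pos h, ih m (i + 1) (by omega) (fun j hj => hg j (by omega))]
          · rw [if_neg h, if_neg h]

-- ===== VERDICT (by name: the statement is the Claim_ definition above) =====
theorem n_activos_con_datos_precint_py_spec : Claim_equal_n_activos_con_datos_precint_py := by
  intro filas max_activos _
  unfold Spec_n_activos_con_datos_precint_py
  unfold n_activos_con_datos_precint_py n_activos_con_datos_precint_py_alt
  have hA : pvLoopA filas max_activos.toNat 0 0 = Int.ofNat (pvCnt filas max_activos.toNat 0) := by
    have := pvLoopA_eq filas max_activos.toNat 0
    simpa using this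
  have hlen : ∀ c : Nat, (filas.foldl pvStep (List.replicate c false)).length = c := by
    intro c; rw [pvFold_length]; simp
  have hB : ∀ c : Nat, pvPrefix (filas.foldl pvStep (List.replicate c false))
      = Int.ofNat (pvCnt filas c 0) := by
    intro c
    rw [pvPrefix_eq filas _ 0 (fun j hj => by
      rw [pvFold_getD]
      rw [hlen c] at hj
      simp [List.getD, hj]), hlen c]
  have hcnt : pvCnt filas max_activos.toNat 0
      = pvCnt filas (min max_activos.toNat (pvMaxLen filas)) 0 := by
    rcases Nat.le_total max_activos.toNat (pvMaxLen filas) with h | h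
    · rw [min_eq_left h]
    · rw [min_eq_right h]
      exact pvCnt_trunc filas (pvMaxLen filas) max_activos.toNat 0 h
        (fun j hj => pvHayA_false_of_ge filas j (by omega))
  show pvLoopA filas max_activos.toNat 0 0 =
    pvPrefix (filas.foldl pvStep (List.replicate (min max_activos.toNat (pvMaxLen filas)) false))
  rw [hA, hB, hcnt]
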